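-- pv_equiv track=rewrite | github.com/dhayarajas/AmazonLLM | remove_authors_fixed.py | remove_bibliography_entries
-- ===== SOURCE A (Python) =====
-- def remove_bibliography_entries(content, refs_to_remove):
--     """Remove bibliography entries for specified references."""
--     lines = content.split('\n')
--     new_lines = []
--     i = 0
--
--     while i < len(lines):
--         line = lines[i]
--
--         # Check if this line contains a bibitem to remove
--         should_skip = False
--         for ref_num in refs_to_remove:
--             if f'\\bibitem{{ref{ref_num}}}' in line:
--                 should_skip = True
--                 # Skip this line and the next blank line if exists
--                 i += 1
--                 if i < len(lines) and lines[i].strip() == '':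
--                     i += 1
--                 break
--
--         if not should_skip:
--             new_lines.append(line)
--             i += 1
--
--     return '\n'.join(new_lines)
-- ===== SOURCE B (Python) =====
-- def remove_bibliography_entries(content, refs_to_remove):
--     """Remove bibliography entries for specified references."""
--     lines = content.split('\n')
--     to_remove = set()
--     for i, line in enumerate(lines):
--         if any(f'\\bibitem{{ref{r}}}' in line for r in refs_to_remove):
--             to_remove.add(i)
--             if i + 1 < len(lines) and lines[i + 1].strip() == '':
--                 to_remove.add(i + 1)
--     return '\n'.join(line for i, line in enumerate(lines) if i not in to_remove)
-- ===== Notes on version B (the rewrite author's own statement) =====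
-- stated objective: alternative
-- what changed: Replaces A's single index-walking while-loop with a lookahead blank-line skip by a two-pass decomposition: first build a set of line indices to remove (each matching bibitem line plus an immediately following blank line), then filter the lines by index and join.
import Mathlib
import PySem

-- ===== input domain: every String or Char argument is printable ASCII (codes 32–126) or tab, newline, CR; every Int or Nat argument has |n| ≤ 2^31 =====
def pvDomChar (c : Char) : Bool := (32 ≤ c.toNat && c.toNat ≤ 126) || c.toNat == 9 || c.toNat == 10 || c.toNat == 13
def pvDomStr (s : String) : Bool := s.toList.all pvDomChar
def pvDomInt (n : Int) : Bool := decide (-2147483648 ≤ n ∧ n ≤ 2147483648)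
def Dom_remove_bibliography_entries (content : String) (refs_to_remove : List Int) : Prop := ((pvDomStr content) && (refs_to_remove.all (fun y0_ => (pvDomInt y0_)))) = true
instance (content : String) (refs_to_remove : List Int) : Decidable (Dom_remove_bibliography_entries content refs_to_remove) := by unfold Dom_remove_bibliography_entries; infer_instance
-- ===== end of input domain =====

-- B replaces A's single index-walking loop with a lookahead skip by a two-pass
-- decomposition: first mark the set of line indices to drop, then filter; same
-- return value on every input (objective: alternative, no speed claim).

-- ===== PORT A =====
-- the f-string '\bibitem{ref{r}}' (shared literal expression of both sources)
def pvPat (r : Int) : String := "\\bibitem{ref" ++ PySem.Int.toStr r ++ "}"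

-- A's while-loop over the index i (lookahead skip of a following blank line)
def pvLoopA (lines : List String) (refs : List Int) (i : Nat) : List String :=
  if h : i < lines.length then
    let line := lines[i]
    if refs.any (fun r => PySem.Str.isIn (pvPat r) line) then
      if h2 : i + 1 < lines.length then
        if PySem.Chars.strip (lines[i + 1].toList) == ([] : List Char) then
          pvLoopA lines refs (i + 2)
        else
          pvLoopA lines refs (i + 1)
      else
        pvLoopA lines refs (i + 1)
    else
      line :: pvLoopA lines refs (i + 1)
  else []
termination_by lines.length - i

def remove_bibliography_entries (content : String) (refs_to_remove : List Int) : String :=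
  PySem.Str.join "\n" (pvLoopA ((PySem.Str.split? content "\n").getD []) refs_to_remove 0)

-- ===== PORT B =====
-- pass 1: the set of indices to remove
def pvMarkB (lines : List String) (refs : List Int) : PySem.Set Int :=
  (PySem.List.enumerate lines).foldl
    (fun s p =>
      if refs.any (fun r => PySem.Str.isIn (pvPat r) p.2) then
        let s1 := PySem.Set.add s p.1
        if decide (p.1 + 1 < (lines.length : Int)) &&
            (PySem.Chars.strip ((PySem.List.pyGetD lines (p.1 + 1) "").toList) == ([] : List Char)) then
          PySem.Set.add s1 (p.1 + 1)
        else s1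
      else s)
    PySem.Set.empty

def remove_bibliography_entries_alt (content : String) (refs_to_remove : List Int) : String :=
  let lines := (PySem.Str.split? content "\n").getD []
  let rem := pvMarkB lines refs_to_remove
  PySem.Str.join "\n"
    ((PySem.List.enumerate lines).filterMap
      (fun p => if PySem.Set.contains rem p.1 then none else some p.2))

-- ===== PRECONDITION & SPEC =====
def Spec_remove_bibliography_entries (content : String) (refs_to_remove : List Int) (out : String) : Prop := out = remove_bibliography_entries_alt content refs_to_remove
instance (content : String) (refs_to_remove : List Int) (out : String) : Decidable (Spec_remove_bibliography_entries content refs_to_remove out) := by unfold Spec_remove_bibliography_entries; infer_instance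

-- ===== CLAIM (what is proved, stated in full; the proofs are below) =====
def Claim_equal_remove_bibliography_entries : Prop := ∀ (content : String) (refs_to_remove : List Int), Dom_remove_bibliography_entries content refs_to_remove → Spec_remove_bibliography_entries content refs_to_remove (remove_bibliography_entries content refs_to_remove)

-- ===== LEMMAS AND PROOFS =====

-- abbreviations over a fixed line list
def pvM (refs : List Int) (l : String) : Bool := refs.any (fun r => PySem.Str.isIn (pvPat r) l)
def pvBl (l : String) : Bool := PySem.Chars.strip l.toList == ([] : List Char)

-- a blank line (strip == '') contains no '\bibitem{ref…}' pattern
lemma pv_blank_not_match (refs : List Int) (l : String) (h : pvBl l = true) :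
    pvM refs l = false := by
  have h' : PySem.Chars.strip l.toList = [] := by
    simpa [pvBl] using h
  have hdw : ∀ c ∈ List.dropWhile PySem.Chars.isspace l.toList, PySem.Chars.isspace c = true := by
    simp only [PySem.Chars.strip, PySem.Chars.rstrip, PySem.Chars.lstrip,
      List.reverse_eq_nil_iff, List.dropWhile_eq_nil_iff, List.mem_reverse] at h'
    exact h'
  have hsp : ∀ c ∈ l.toList, PySem.Chars.isspace c = true := by
    intro c hc
    rw [← List.takeWhile_append_dropWhile (p := PySem.Chars.isspace) (l := l.toList)] at hc
    rcases List.mem_append.mp hc with hc | hc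
    · exact List.mem_takeWhile_imp hc
    · exact hdw c hc
  rw [pvM, List.any_eq_false]
  intro r hr habs
  have hinf := (PySem.Str.isIn_iff_infix _ _).mp habs
  have hmem : '\\' ∈ l.toList := by
    refine hinf.subset ?_
    have hx : '\\' ∈ "\\bibitem{ref".toList := by decide
    simp only [pvPat, String.toList_append]
    exact List.mem_append_left _ (List.mem_append_left _ hx)
  have := hsp _ hmem
  simp [PySem.Chars.isspace] at this

-- one step of B's marking fold adds the indices directed by p
lemma pv_mem_foldl (lines : List String) (refs : List Int) :
    ∀ (l : List (Int × String)) (s : PySem.Set Int) (k : Int),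
      (k ∈ l.foldl
        (fun s p =>
          if refs.any (fun r => PySem.Str.isIn (pvPat r) p.2) then
            let s1 := PySem.Set.add s p.1
            if decide (p.1 + 1 < (lines.length : Int)) &&
                (PySem.Chars.strip ((PySem.List.pyGetD lines (p.1 + 1) "").toList) == ([] : List Char)) then
              PySem.Set.add s1 (p.1 + 1)
            else s1
          else s) s) ↔
      (k ∈ s ∨ ∃ p ∈ l, pvM refs p.2 = true ∧
        (k = p.1 ∨ (p.1 + 1 < (lines.length : Int) ∧
          pvBl (PySem.List.pyGetD lines (p.1 + 1) "") = true ∧ k = p.1 + 1))) := by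
  intro l
  induction l with
  | nil => simp
  | cons p t ih =>
    intro s k
    rw [List.foldl_cons, ih]
    by_cases hm : pvM refs p.2 = true
    · have hm' : (refs.any fun r => PySem.Str.isIn (pvPat r) p.2) = true := hm
      rw [if_pos hm']
      by_cases hb : (decide (p.1 + 1 < (lines.length : Int)) &&
          (PySem.Chars.strip ((PySem.List.pyGetD lines (p.1 + 1) "").toList) == ([] : List Char))) = true
      · have hb' := hb
        rw [Bool.and_eq_true, decide_eq_true_iff] at hb'
        have hbl : pvBl (PySem.List.pyGetD lines (p.1 + 1) "") = true := by
          simpa [pvBl] using hb'.2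
        rw [if_pos hb]
        simp only [PySem.Set.mem_add, List.mem_cons]
        constructor
        · rintro (((hs | h1) | h2) | ⟨q, hq, hmq, hc⟩)
          · exact Or.inl hs
          · exact Or.inr ⟨p, Or.inl rfl, hm, Or.inl h1⟩
          · exact Or.inr ⟨p, Or.inl rfl, hm, Or.inr ⟨hb'.1, hbl, h2⟩⟩
          · exact Or.inr ⟨q, Or.inr hq, hmq, hc⟩
        · rintro (hs | ⟨q, (rfl | hq), hmq, hc⟩)
          · exact Or.inl (Or.inl (Or.inl hs))
          · rcases hc with h1 | ⟨_, _, h2⟩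
            · exact Or.inl (Or.inl (Or.inr h1))
            · exact Or.inl (Or.inr h2)
          · exact Or.inr ⟨q, hq, hmq, hc⟩
      · rw [if_neg hb]
        simp only [PySem.Set.mem_add, List.mem_cons]
        constructor
        · rintro ((hs | h1) | ⟨q, hq, hmq, hc⟩)
          · exact Or.inl hs
          · exact Or.inr ⟨p, Or.inl rfl, hm, Or.inl h1⟩
          · exact Or.inr ⟨q, Or.inr hq, hmq, hc⟩
        · rintro (hs | ⟨q, (rfl | hq), hmq, hc⟩)
          · exact Or.inl (Or.inl hs)
          · rcases hc with h1 | ⟨hlt, hbl, h2⟩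
            · exact Or.inl (Or.inr h1)
            · have hcontra : (decide (q.1 + 1 < (lines.length : Int)) &&
                  (PySem.Chars.strip ((PySem.List.pyGetD lines (q.1 + 1) "").toList) == ([] : List Char))) = true := by
                rw [Bool.and_eq_true, decide_eq_true_iff]
                exact ⟨hlt, by simpa [pvBl] using hbl⟩
              exact absurd hcontra hb
          · exact Or.inr ⟨q, hq, hmq, hc⟩
    · have hm' : (refs.any fun r => PySem.Str.isIn (pvPat r) p.2) = false :=
        eq_false_of_ne_true hm
      simp only [hm', Bool.false_eq_true, if_false, List.mem_cons]
      constructor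
      · rintro (hs | ⟨q, hq, hmq, hc⟩)
        · exact Or.inl hs
        · exact Or.inr ⟨q, Or.inr hq, hmq, hc⟩
      · rintro (hs | ⟨q, (rfl | hq), hmq, hc⟩)
        · exact Or.inl hs
        · exact absurd hmq hm
        · exact Or.inr ⟨q, hq, hmq, hc⟩

-- membership in B's mark set
lemma pv_mem_mark (lines : List String) (refs : List Int) (k : Int) :
    PySem.Set.contains (pvMarkB lines refs) k = true ↔
      ∃ j : Nat, j < lines.length ∧ pvM refs (lines.getD j "") = true ∧
        (k = (j : Int) ∨ ((j : Int) + 1 < (lines.length : Int) ∧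
            pvBl (lines.getD (j + 1) "") = true ∧ k = (j : Int) + 1)) := by
  rw [PySem.Set.contains_iff, pvMarkB, pv_mem_foldl]
  simp only [PySem.Set.empty]
  constructor
  · rintro (hs | ⟨p, hp, hmq, hc⟩)
    · simp at hs
    · obtain ⟨j, hj, rfl⟩ := (PySem.List.mem_enumerate_iff _ _ _).mp hp
      simp only [zero_add] at hmq hc ⊢
      refine ⟨j, hj, by rwa [List.getD_eq_getElem _ _ hj], ?_⟩
      rcases hc with h | ⟨h1, h2, h3⟩
      · exact Or.inl h
      · refine Or.inr ⟨h1, ?_, h3⟩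
        rwa [show ((j : Int) + 1) = ((j + 1 : Nat) : Int) by push_cast; ring,
          PySem.List.pyGetD_natCast] at h2
  · rintro ⟨j, hj, hm, hc⟩
    refine Or.inr ⟨((j : Int), lines[j]), ?_, by rwa [List.getD_eq_getElem _ _ hj] at hm, ?_⟩
    · exact (PySem.List.mem_enumerate_iff _ _ _).mpr ⟨j, hj, by simp⟩
    · rcases hc with h | ⟨h1, h2, h3⟩
      · exact Or.inl h
      · refine Or.inr ⟨h1, ?_, h3⟩
        rwa [show ((j : Int) + 1) = ((j + 1 : Nat) : Int) by push_cast; ring,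
          PySem.List.pyGetD_natCast]

-- the main correspondence between A's loop and B's mark-then-filter
lemma pv_main (lines : List String) (refs : List Int) :
    ∀ n i, lines.length - i < n →
      (i = 0 ∨ (pvM refs (lines.getD (i - 1) "") = true → i < lines.length →
        pvBl (lines.getD i "") = false)) →
      pvLoopA lines refs i =
        (PySem.List.enumerate (lines.drop i) (i : Int)).filterMap
          (fun p => if PySem.Set.contains (pvMarkB lines refs) p.1 then none else some p.2) := by
  intro n
  induction n with
  | zero => intro i hn; omega
  | succ n IH =>
    intro i hn hok
    by_cases hi : i < lines.length
    · rw [pvLoopA, dif_pos hi, List.drop_eq_getElem_cons hi, PySem.List.enumerate_cons,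
        List.filterMap_cons]
      simp only []
      by_cases hm : pvM refs lines[i] = true
      · have hm' : (refs.any fun r => PySem.Str.isIn (pvPat r) lines[i]) = true := hm
        rw [if_pos hm']
        have hci : PySem.Set.contains (pvMarkB lines refs) (i : Int) = true :=
          (pv_mem_mark lines refs _).mpr
            ⟨i, hi, by rwa [List.getD_eq_getElem _ _ hi], Or.inl rfl⟩
        rw [if_pos hci]
        by_cases h2 : i + 1 < lines.length
        · rw [dif_pos h2]
          by_cases hb : (PySem.Chars.strip (lines[i + 1].toList) == ([] : List Char)) = true
          · rw [if_pos hb]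
            have hbl : pvBl (lines.getD (i + 1) "") = true := by
              rw [List.getD_eq_getElem _ _ h2]; simpa [pvBl] using hb
            rw [List.drop_eq_getElem_cons h2, PySem.List.enumerate_cons, List.filterMap_cons]
            have hc2 : PySem.Set.contains (pvMarkB lines refs) ((i : Int) + 1) = true :=
              (pv_mem_mark lines refs _).mpr
                ⟨i, hi, by rwa [List.getD_eq_getElem _ _ hi],
                  Or.inr ⟨by exact_mod_cast h2, hbl, rfl⟩⟩
            rw [if_pos hc2]
            have hok2 : i + 2 = 0 ∨ (pvM refs (lines.getD (i + 2 - 1) "") = true →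
                i + 2 < lines.length → pvBl (lines.getD (i + 2) "") = false) := by
              refine Or.inr (fun hM _ => ?_)
              have hMf : pvM refs (lines.getD (i + 1) "") = false :=
                pv_blank_not_match refs _ hbl
              rw [show i + 2 - 1 = i + 1 by omega, hMf] at hM
              exact absurd hM (by simp)
            have hrec := IH (i + 2) (by omega) hok2
            rw [show ((i : Int) + 1 + 1) = ((i + 2 : Nat) : Int) by push_cast; ring]
            exact hrec
          · rw [if_neg hb]
            have hok1 : i + 1 = 0 ∨ (pvM refs (lines.getD (i + 1 - 1) "") = true →
                i + 1 < lines.length → pvBl (lines.getD (i + 1) "") = false) := by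
              refine Or.inr (fun _ _ => ?_)
              rw [List.getD_eq_getElem _ _ h2]
              exact eq_false_of_ne_true (by simpa [pvBl] using hb)
            have hrec := IH (i + 1) (by omega) hok1
            rw [show ((i : Int) + 1) = ((i + 1 : Nat) : Int) by push_cast; ring]
            exact hrec
        · rw [dif_neg h2]
          have hok1 : i + 1 = 0 ∨ (pvM refs (lines.getD (i + 1 - 1) "") = true →
              i + 1 < lines.length → pvBl (lines.getD (i + 1) "") = false) :=
            Or.inr (fun _ hlt => absurd hlt h2)
          have hrec := IH (i + 1) (by omega) hok1
          rw [show ((i : Int) + 1) = ((i + 1 : Nat) : Int) by push_cast; ring]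
          exact hrec
      · have hm' : (refs.any fun r => PySem.Str.isIn (pvPat r) lines[i]) = false :=
          eq_false_of_ne_true hm
        simp only [hm', Bool.false_eq_true, if_false]
        have hci : PySem.Set.contains (pvMarkB lines refs) (i : Int) = false := by
          apply eq_false_of_ne_true
          intro habs
          obtain ⟨j, hj, hMj, hc⟩ := (pv_mem_mark lines refs _).mp habs
          rcases hc with h | ⟨h1, h2, h3⟩
          · have hji : j = i := by exact_mod_cast h.symm
            subst hji
            rw [List.getD_eq_getElem _ _ hj] at hMj
            exact hm hMj
          · have hij : i = j + 1 := by exact_mod_cast h3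
            rcases hok with h0 | hok
            · omega
            · have hMj' : pvM refs (lines.getD (i - 1) "") = true := by
                rw [show i - 1 = j by omega]; exact hMj
              have hbl' : pvBl (lines.getD i "") = true := by
                rw [hij]; exact h2
              rw [hok hMj' hi] at hbl'
              exact absurd hbl' (by simp)
        simp only [hci, Bool.false_eq_true, if_false]
        have hok1 : i + 1 = 0 ∨ (pvM refs (lines.getD (i + 1 - 1) "") = true →
            i + 1 < lines.length → pvBl (lines.getD (i + 1) "") = false) := by
          refine Or.inr (fun hM _ => ?_)
          simp only [Nat.add_sub_cancel] at hM
          rw [List.getD_eq_getElem _ _ hi] at hM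
          exact absurd hM hm
        have hrec := IH (i + 1) (by omega) hok1
        rw [show ((i : Int) + 1) = ((i + 1 : Nat) : Int) by push_cast; ring]
        exact congrArg (lines[i] :: ·) hrec
    · rw [pvLoopA, dif_neg hi, List.drop_eq_nil_of_le (by omega)]
      simp

-- ===== VERDICT (by name: the statement is the Claim_ definition above) =====
theorem remove_bibliography_entries_spec : Claim_equal_remove_bibliography_entries := by
  intro content refs _
  unfold Spec_remove_bibliography_entries remove_bibliography_entries remove_bibliography_entries_alt
  have := pv_main ((PySem.Str.split? content "\n").getD []) refs
    (((PySem.Str.split? content "\n").getD []).length + 1) 0 (by omega) (Or.inl rfl)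
  refine congrArg (PySem.Str.join "\n") ?_
  simpa using this
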